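-- pv_equiv track=rewrite | github.com/sirdesmond09/eld-backend | utils/views.py | has_XSS
-- ===== SOURCE A (Python) =====
-- def has_XSS(data):
--
--     data = str(data).lower()
--     FORBIDDEN_CHARS = (
--         "<script",
--         " javascript:",
--         " onerror=",
--         " onload=",
--         " onclick=",
--         " onmouseover=",
--         " onfocus=",
--         " onsubmit=",
--     )
--
--     for char in FORBIDDEN_CHARS:
--         if char in data:
--             return True
--
--     return False
-- ===== SOURCE B (Python) =====
-- def has_XSS(data):
--     data = str(data).lower()
--     FORBIDDEN_CHARS = (
--         "<script",
--         " javascript:",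
--         " onerror=",
--         " onload=",
--         " onclick=",
--         " onmouseover=",
--         " onfocus=",
--         " onsubmit=",
--     )
--     # single left-to-right scan: at each position test whether any pattern starts there
--     for i in range(len(data)):
--         if any(data.startswith(p, i) for p in FORBIDDEN_CHARS):
--             return True
--     return False
-- ===== Notes on version B (the rewrite author's own statement) =====
-- stated objective: alternative
-- what changed: Replaced eight independent pattern-major whole-string membership scans with one position-major left-to-right scan that tests every pattern as a prefix at each index.
import Mathlib
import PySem

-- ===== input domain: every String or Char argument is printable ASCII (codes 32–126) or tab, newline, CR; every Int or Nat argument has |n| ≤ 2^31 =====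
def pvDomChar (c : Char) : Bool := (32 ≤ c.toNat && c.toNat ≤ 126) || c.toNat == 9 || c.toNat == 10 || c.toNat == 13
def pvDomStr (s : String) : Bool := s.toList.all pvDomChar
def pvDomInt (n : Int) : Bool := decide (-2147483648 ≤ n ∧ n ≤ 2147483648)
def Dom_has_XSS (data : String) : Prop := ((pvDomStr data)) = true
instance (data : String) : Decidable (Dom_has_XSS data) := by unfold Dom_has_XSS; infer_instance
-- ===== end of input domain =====

-- B replaces eight independent whole-string substring scans by one position-major
-- left-to-right scan testing all patterns as prefixes at each index (alternative, same cost).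


-- ===== PORT A =====
-- the tuple FORBIDDEN_CHARS
def xssForbidden : List String :=
  ["<script", " javascript:", " onerror=", " onload=", " onclick=",
   " onmouseover=", " onfocus=", " onsubmit="]

-- 'for char in FORBIDDEN_CHARS: if char in data: return True' then 'return False'
def xssLoopA : List String → String → Bool
  | [], _ => false
  | p :: rest, d => if PySem.Str.isIn p d then true else xssLoopA rest d

def has_XSS (data : String) : Bool :=
  xssLoopA xssForbidden (PySem.Str.lower data)

-- ===== PORT B =====
-- patterns as character lists (B scans character positions)
def xssPatterns : List (List Char) := xssForbidden.map String.toList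

-- 'for i in range(len(data)): if any(data.startswith(p, i) for p in FORBIDDEN_CHARS): return True'
def xssScanB : List Char → Bool
  | [] => false
  | c :: rest =>
      if xssPatterns.any (fun p => p.isPrefixOf (c :: rest)) then true
      else xssScanB rest

def has_XSS_alt (data : String) : Bool :=
  xssScanB (PySem.Str.lower data).toList

-- ===== PRECONDITION & SPEC =====
def Spec_has_XSS (data : String) (out : Bool) : Prop := out = has_XSS_alt data
instance (data : String) (out : Bool) : Decidable (Spec_has_XSS data out) := by unfold Spec_has_XSS; infer_instance

-- ===== CLAIM (what is proved, stated in full; the proofs are below) =====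
def Claim_equal_has_XSS : Prop := ∀ (data : String), Dom_has_XSS data → Spec_has_XSS data (has_XSS data)

-- ===== LEMMAS AND PROOFS =====

lemma xssLoopA_iff (ps : List String) (d : String) :
    xssLoopA ps d = true ↔ ∃ p ∈ ps, p.toList <:+: d.toList := by
  induction ps with
  | nil => simp [xssLoopA]
  | cons p rest ih =>
      simp only [xssLoopA]
      by_cases h : PySem.Str.isIn p d = true
      · simp only [if_pos h, true_iff]
        exact ⟨p, List.mem_cons_self .., (PySem.Str.isIn_iff_infix p d).mp h⟩
      · have h' : ¬ p.toList <:+: d.toList := fun hc => h ((PySem.Str.isIn_iff_infix p d).mpr hc)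
        rw [if_neg h, ih]
        constructor
        · rintro ⟨q, hq, hi⟩; exact ⟨q, List.mem_cons_of_mem _ hq, hi⟩
        · rintro ⟨q, hq, hi⟩
          rcases List.mem_cons.mp hq with rfl | hq
          · exact absurd hi h'
          · exact ⟨q, hq, hi⟩

lemma xssScanB_iff (cs : List Char) :
    xssScanB cs = true ↔ ∃ p ∈ xssPatterns, p <:+: cs := by
  induction cs with
  | nil =>
      simp only [xssScanB]
      constructor
      · intro h; exact absurd h (by decide)
      · rintro ⟨p, hp, hinf⟩
        have : p = [] := List.eq_nil_of_infix_nil hinf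
        subst this
        revert hp; decide
  | cons c rest ih =>
      simp only [xssScanB]
      by_cases h : xssPatterns.any (fun p => p.isPrefixOf (c :: rest)) = true
      · simp only [if_pos h, true_iff]
        rcases List.any_eq_true.mp h with ⟨p, hp, hpre⟩
        exact ⟨p, hp, (List.isPrefixOf_iff_prefix.mp hpre).isInfix⟩
      · rw [if_neg h, ih]
        constructor
        · rintro ⟨p, hp, hinf⟩; exact ⟨p, hp, hinf.trans (List.suffix_cons c rest).isInfix⟩
        · rintro ⟨p, hp, hinf⟩
          rcases (List.infix_cons_iff).mp hinf with hpre | htail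
          · exact absurd (List.any_eq_true.mpr ⟨p, hp, show p.isPrefixOf (c :: rest) = true from List.isPrefixOf_iff_prefix.mpr hpre⟩) h
          · exact ⟨p, hp, htail⟩

lemma xss_sides_iff (d : String) :
    (∃ p ∈ xssPatterns, p <:+: d.toList) ↔ ∃ p ∈ xssForbidden, p.toList <:+: d.toList := by
  constructor
  · rintro ⟨p, hp, hinf⟩
    rcases List.mem_map.mp hp with ⟨s, hs, rfl⟩
    exact ⟨s, hs, hinf⟩
  · rintro ⟨s, hs, hinf⟩
    exact ⟨s.toList, List.mem_map.mpr ⟨s, hs, rfl⟩, hinf⟩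

-- ===== VERDICT (by name: the statement is the Claim_ definition above) =====
theorem has_XSS_spec : Claim_equal_has_XSS := by
  intro data _
  unfold Spec_has_XSS has_XSS has_XSS_alt
  have key := (xssLoopA_iff xssForbidden (PySem.Str.lower data)).trans
    ((xss_sides_iff (PySem.Str.lower data)).symm.trans (xssScanB_iff (PySem.Str.lower data).toList).symm)
  cases hB : xssScanB (PySem.Str.lower data).toList with
  | false =>
      rw [hB] at key
      exact Bool.eq_false_iff.mpr (fun h => by simp [h] at key)
  | true => exact key.mpr hB
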